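-- pv_equiv track=rewrite | github.com/rkarthi2310/CS6230-CadForVLSI-Project1 | verification_unpipelined/test_patterns.py | generate_walking_zeros
-- ===== SOURCE A (Python) =====
-- def generate_walking_zeros(n):
--     """
--     Generate n-bit walking zeros pattern.
--     Example for n=4: 1110, 1101, 1011, 0111
--     """
--     patterns = []
--     for i in range(n):
--         # Create all 1s then clear one bit
--         pattern = (1 << n) - 1  # all ones
--         pattern &= ~(1 << i)    # clear bit at position i
--         patterns.append(format(pattern, f'0{n}b'))
--     patterns.reverse()
--     return patterns
-- ===== SOURCE B (Python) =====
-- def generate_walking_zeros(n):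
--     """
--     Generate n-bit walking zeros pattern.
--     The j-th pattern simply has its single '0' at string position j,
--     so build each string directly: no bit arithmetic, no reversal.
--     """
--     return ['1' * j + '0' + '1' * (n - 1 - j) for j in range(n)]
-- ===== Notes on version B (the rewrite author's own statement) =====
-- stated objective: simpler
-- what changed: Instead of building an all-ones integer, clearing bit i, formatting it in binary and reversing the list, B observes that the j-th output string is just '0' at position j and '1' elsewhere, and builds each string directly in output order.
import Mathlib
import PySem

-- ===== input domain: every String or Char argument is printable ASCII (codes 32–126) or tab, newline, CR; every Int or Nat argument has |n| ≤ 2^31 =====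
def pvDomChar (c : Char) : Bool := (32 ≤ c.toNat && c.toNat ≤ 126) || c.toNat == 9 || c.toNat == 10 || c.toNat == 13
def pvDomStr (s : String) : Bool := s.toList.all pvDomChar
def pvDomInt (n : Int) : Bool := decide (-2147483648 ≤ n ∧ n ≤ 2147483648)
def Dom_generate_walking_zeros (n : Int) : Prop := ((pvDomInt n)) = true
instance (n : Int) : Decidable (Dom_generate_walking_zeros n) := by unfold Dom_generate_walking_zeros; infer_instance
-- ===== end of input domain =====

-- ===== PORT A =====
-- B builds each pattern string directly ('0' at position j, '1' elsewhere) instead of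
-- A's clear-one-bit-then-binary-format-then-reverse; objective: simpler. Proved equal for all n.

-- chars of the binary representation of a positive number, most significant first
def pvBinChars (v : Nat) : List Char :=
  if v = 0 then [] else pvBinChars (v / 2) ++ [if v % 2 = 1 then '1' else '0']

-- port of format(v, f'0{w}b'); exact for v >= 0 and any w (A only calls it with 1 <= w, 0 <= v)
def pvFormatBin (w : Int) (v : Int) : String :=
  let ds := if v = 0 then ['0'] else pvBinChars v.toNat
  String.ofList (List.replicate (w.toNat - ds.length) '0' ++ ds)

def generate_walking_zeros (n : Int) : List String :=
  let patterns := (PySem.List.pyRange 0 n 1).foldl (fun acc i =>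
    -- pattern = (1 << n) - 1 ; pattern &= ~(1 << i)
    -- n >= 1 and 0 <= i < n whenever the loop body runs, so the .toNat shifts are exact
    let pattern : Int := ((1 : Int) <<< n.toNat) - 1
    let pattern := Int.land pattern (Int.lnot ((1 : Int) <<< i.toNat))
    acc ++ [pvFormatBin n pattern]) []
  patterns.reverse

-- ===== PORT B =====
def generate_walking_zeros_alt (n : Int) : List String :=
  (PySem.List.pyRange 0 n 1).map (fun j =>
    String.ofList (List.replicate j.toNat '1' ++ '0' :: List.replicate (n - 1 - j).toNat '1'))

-- ===== PRECONDITION & SPEC =====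
def Spec_generate_walking_zeros (n : Int) (out : List String) : Prop := out = generate_walking_zeros_alt n
instance (n : Int) (out : List String) : Decidable (Spec_generate_walking_zeros n out) := by unfold Spec_generate_walking_zeros; infer_instance

-- ===== CLAIM =====
def Claim_equal_generate_walking_zeros : Prop := ∀ (n : Int), Dom_generate_walking_zeros n → Spec_generate_walking_zeros n (generate_walking_zeros n)

-- ===== LEMMAS AND PROOFS =====

theorem pvBinChars_two_pow_sub_one (k : Nat) : pvBinChars (2 ^ k - 1) = List.replicate k '1' := by
  induction k with
  | zero => simp [pvBinChars]
  | succ m ih =>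
    rw [pvBinChars]
    have h1 : 2 ^ (m + 1) - 1 ≠ 0 := by
      have : (2:Nat) ^ (m+1) = 2 * 2 ^ m := by ring
      have : (1:Nat) ≤ 2 ^ m := Nat.one_le_two_pow
      omega
    have h2 : (2 ^ (m + 1) - 1) / 2 = 2 ^ m - 1 := by
      have : (2:Nat) ^ (m+1) = 2 * 2 ^ m := by ring
      omega
    have h3 : (2 ^ (m + 1) - 1) % 2 = 1 := by
      have : (2:Nat) ^ (m+1) = 2 * 2 ^ m := by ring
      omega
    rw [if_neg h1, h2, h3, ih]
    simp [List.replicate_succ']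

-- the walking-zeros value, in binary, is ones with a single zero at bit i
theorem pvBinChars_walking (i N : Nat) (h : i < N) :
    pvBinChars (2 ^ N - 1 - 2 ^ i) =
      if i = N - 1 then List.replicate (N - 1) '1'
      else List.replicate (N - 1 - i) '1' ++ '0' :: List.replicate i '1' := by
  induction i generalizing N with
  | zero =>
    rcases Nat.lt_or_ge 1 N with hN | hN
    · -- N ≥ 2 : value is even, v/2 = 2^(N-1)-1
      have hpow : (2:Nat) ^ N = 2 * 2 ^ (N - 1) := by
        conv_lhs => rw [show N = (N-1)+1 by omega]
        ring
      have h1 : 2 ^ (N-1) ≥ 2 := by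
        calc (2:Nat) ^ 1 ≤ 2 ^ (N-1) := Nat.pow_le_pow_right (by norm_num) (by omega)
        _ = 2 ^ (N-1) := rfl
      rw [pvBinChars]
      have hv0 : 2 ^ N - 1 - 2 ^ 0 ≠ 0 := by simp only [pow_zero]; omega
      have hdiv : (2 ^ N - 1 - 2 ^ 0) / 2 = 2 ^ (N-1) - 1 := by simp only [pow_zero]; omega
      have hmod : (2 ^ N - 1 - 2 ^ 0) % 2 = 0 := by simp only [pow_zero]; omega
      rw [if_neg hv0, hdiv, hmod, pvBinChars_two_pow_sub_one]
      have hne : (0:Nat) ≠ N - 1 := by omega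
      simp [hne]
    · -- N = 1 : value is 0
      have hN1 : N = 1 := by omega
      subst hN1
      simp [pvBinChars]
  | succ m ih =>
    have hN2 : 2 ≤ N := by omega
    have hpow : (2:Nat) ^ N = 2 * 2 ^ (N - 1) := by
      conv_lhs => rw [show N = (N-1)+1 by omega]
      ring
    have hpowi : (2:Nat) ^ (m+1) = 2 * 2 ^ m := by ring
    have hile : (2:Nat) ^ (m+1) ≤ 2 ^ N - 1 := by
      have := Nat.pow_lt_pow_right (show 1 < 2 by norm_num) h
      omega
    rw [pvBinChars]
    have hv0 : 2 ^ N - 1 - 2 ^ (m+1) ≠ 0 := by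
      have := Nat.pow_lt_pow_right (show 1 < 2 by norm_num) h
      omega
    have hm2 : (2:Nat) ^ m ≤ 2 ^ (N-1) := Nat.pow_le_pow_right (by norm_num) (by omega)
    have hdiv : (2 ^ N - 1 - 2 ^ (m+1)) / 2 = 2 ^ (N-1) - 1 - 2 ^ m := by omega
    have hmod : (2 ^ N - 1 - 2 ^ (m+1)) % 2 = 1 := by omega
    rw [if_neg hv0, hdiv, hmod, ih (N-1) (by omega)]
    by_cases hlast : m + 1 = N - 1
    · rw [if_pos hlast, if_pos (by omega : m = (N-1) - 1)]
      rw [show N - 1 = m + 1 from hlast.symm]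
      simp [List.replicate_succ']
    · rw [if_neg hlast, if_neg (by omega : ¬ m = (N-1) - 1)]
      have : N - 1 - 1 - m = N - 1 - (m+1) := by omega
      simp [this, List.replicate_succ']

theorem ldiff_walking (i N : Nat) (h : i < N) :
    Nat.ldiff (2 ^ N - 1) (2 ^ i) = 2 ^ N - 1 - 2 ^ i := by
  apply Nat.eq_of_testBit_eq
  intro k
  rw [Nat.testBit_ldiff, Nat.testBit_two_pow_sub_one, Nat.testBit_two_pow]
  have h1 : (2:Nat) ^ N = 2 ^ (i+1) * 2 ^ (N - i - 1) := by
    rw [← pow_add]; congr 1; omega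
  have h2 : (1:Nat) ≤ 2 ^ (N - i - 1) := Nat.one_le_two_pow
  have h3 : (1:Nat) ≤ 2 ^ i := Nat.one_le_two_pow
  have h4 : (2:Nat) ^ (i+1) = 2 * 2 ^ i := by ring
  have h5 : (2:Nat) ^ (i+1) ≤ 2 ^ N := Nat.pow_le_pow_right (by norm_num) (by omega)
  have hms : (2:Nat) ^ (i+1) * (2 ^ (N - i - 1) - 1) = 2 ^ N - 2 ^ (i+1) := by
    rw [Nat.mul_sub, mul_one, ← h1]
  have hdec : 2 ^ N - 1 - 2 ^ i = 2 ^ (i+1) * (2 ^ (N - i - 1) - 1) + (2 ^ i - 1) := by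
    omega
  rw [hdec, Nat.testBit_two_pow_mul_add _ (by omega)]
  by_cases hk : k < i + 1
  · rw [if_pos hk, Nat.testBit_two_pow_sub_one]
    by_cases hki : k < i
    · simp [hki, (show k < N by omega), (show ¬ i = k by omega)]
    · simp [(show i = k by omega)]
  · rw [if_neg hk, Nat.testBit_two_pow_sub_one]
    by_cases hkN : k < N
    · simp [(show k - (i+1) < N - i - 1 by omega), hkN, (show ¬ i = k by omega)]
    · simp [(show ¬ (k - (i+1) < N - i - 1) by omega), hkN]

theorem formatBin_walking (i N : Nat) (h : i < N) :
    pvFormatBin (N : Int) ((2 ^ N - 1 - 2 ^ i : Nat) : Int) =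
      String.ofList (List.replicate (N - 1 - i) '1' ++ '0' :: List.replicate i '1') := by
  unfold pvFormatBin
  have hp : (2:Nat) ^ N = 2 * 2 ^ (N-1) := by
    conv_lhs => rw [show N = (N-1)+1 by omega]
    ring
  have hiN : (2:Nat) ^ i ≤ 2 ^ (N-1) := Nat.pow_le_pow_right (by norm_num) (by omega)
  by_cases hz : (2 ^ N - 1 - 2 ^ i : Nat) = 0
  · -- only possible when N = 1, i = 0
    have hone : (1:Nat) ≤ 2 ^ (N-1) := Nat.one_le_two_pow
    have hN1 : N = 1 := by
      by_contra hne
      have h2 : (2:Nat) ^ 1 ≤ 2 ^ (N-1) := Nat.pow_le_pow_right (by norm_num) (by omega)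
      have hone2 : (1:Nat) ≤ 2 ^ i := Nat.one_le_two_pow
      norm_num at h2
      omega
    have hi0 : i = 0 := by omega
    subst hN1; subst hi0
    decide
  · simp only [Nat.cast_eq_zero, if_neg hz, pvBinChars_walking i N h, Int.toNat_natCast]
    by_cases hlast : i = N - 1
    · rw [if_pos hlast]
      rw [List.length_replicate, (show N - (N-1) = 1 by omega)]
      subst hlast
      simp [List.replicate_succ']
    · rw [if_neg hlast]
      have hlen : (List.replicate (N-1-i) '1' ++ '0' :: List.replicate i '1').length = N := by
        simp; omega
      rw [hlen, Nat.sub_self]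
      simp

theorem gen_loop (n : Int) (l : List Int) (acc : List String) :
    (l.foldl (fun acc i =>
      let pattern : Int := ((1 : Int) <<< n.toNat) - 1
      let pattern := Int.land pattern (Int.lnot ((1 : Int) <<< i.toNat))
      acc ++ [pvFormatBin n pattern]) acc) =
    acc ++ l.map (fun i =>
      pvFormatBin n (Int.land (((1 : Int) <<< n.toNat) - 1) (Int.lnot ((1 : Int) <<< i.toNat)))) := by
  induction l generalizing acc with
  | nil => simp
  | cons h t ih =>
    simp only [List.foldl_cons, List.map_cons]
    rw [ih]
    simp

theorem land_lnot_cast (a b : Nat) :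
    Int.land ((a : Int)) (Int.lnot ((b : Int))) = ((Nat.ldiff a b : Nat) : Int) := rfl

-- the value A computes for loop index k (0 ≤ k < n), in closed form
theorem one_shiftLeft_nat (m : Nat) : (1:Int) <<< m = ((2 ^ m : Nat) : Int) := by
  show Int.ofNat (1 <<< m) = _
  rw [Nat.one_shiftLeft]
  rfl

theorem pattern_char (n : Int) (k : Nat) (hk : (k : Int) < n) :
    Int.land (((1 : Int) <<< (n.toNat : Nat)) - 1) (Int.lnot ((1 : Int) <<< ((k : Nat) : Int))) =
      ((2 ^ n.toNat - 1 - 2 ^ k : Nat) : Int) := by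
  have h1 : (1:Nat) ≤ 2 ^ n.toNat := Nat.one_le_two_pow
  rw [one_shiftLeft_nat, Int.one_shiftLeft,
    (show ((2 ^ n.toNat : Nat) : Int) - 1 = ((2 ^ n.toNat - 1 : Nat) : Int) by omega),
    land_lnot_cast, ldiff_walking k n.toNat (by omega)]

-- ===== VERDICT =====
theorem generate_walking_zeros_spec : Claim_equal_generate_walking_zeros := by
  unfold Claim_equal_generate_walking_zeros Spec_generate_walking_zeros
  intro n _
  unfold generate_walking_zeros generate_walking_zeros_alt
  rw [PySem.List.pyRange_one, gen_loop, List.nil_append, List.map_map, List.map_map]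
  simp only [Function.comp_def, zero_add, Int.toNat_natCast]
  set N := (n - 0).toNat with hN
  apply List.ext_getElem
  · simp
  · intro j h1 h2
    simp only [List.length_reverse, List.length_map, List.length_range] at h1 h2
    rw [List.getElem_reverse, List.getElem_map, List.getElem_map]
    simp only [List.length_map, List.length_range]
    rw [List.getElem_range, List.getElem_range]
    have hn0 : 0 < n := by
      by_contra hle
      have : N = 0 := by omega
      omega
    have hNn : (N : Int) = n := by omega
    set k : Nat := N - 1 - j with hkdef
    have hkN : k < N := by omega
    rw [pattern_char n k (by omega)]
    have hnN : n.toNat = N := by omega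
    rw [hnN]
    have hfmt := formatBin_walking k N hkN
    rw [(show ((N:Nat) : Int) = n from hNn)] at hfmt
    rw [hfmt]
    have e2 : (n - 1 - (j:Int)).toNat = k := by omega
    have e3 : N - 1 - k = j := by omega
    rw [e2, e3]
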